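-- pv_equiv track=rewrite | github.com/tanmoysrt/BCSE3-Assignment | Computer Network/practice/error-detection/checksum.py | addBinaryStringUsingOnesComplement
-- ===== SOURCE A (Python) =====
-- def addBinaryStringUsingOnesComplement(a:str, b:str):
--     max_len = max(len(a), len(b))
--
--     a = a.zfill(max_len)
--     b = b.zfill(max_len)
--
--     result = ""
--     carry = 0
--
--     for i in range(max_len-1, -1, -1):
--         r = carry
--         r += 1 if a[i] == '1' else 0
--         r += 1 if b[i] == '1' else 0
--
--         # if r is 1 that means it has no carry and result 1 ,
--         # but, if r is 2 that means in binary it would be actually 10 , that means r will be  0 and carry will be 1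
--
--         result = ('1' if r%2 == 1 else '0') + result
--         carry = 0 if r<2 else 1
--
--     if carry != 0:
--         result = addBinaryStringUsingOnesComplement(result, '1')
--     return result.zfill(max_len)
-- ===== SOURCE B (Python) =====
-- def addBinaryStringUsingOnesComplement(a: str, b: str):
--     n = max(len(a), len(b))
--     va = 0
--     for c in a:
--         va = va * 2 + (1 if c == '1' else 0)
--     vb = 0
--     for c in b:
--         vb = vb * 2 + (1 if c == '1' else 0)
--     total = va + vb
--     while total >> n:
--         total = (total >> n) + (total & ((1 << n) - 1))
--     if total == 0:
--         return '0' * n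
--     r = format(total, 'b')
--     return '0' * (n - len(r)) + r
-- ===== Notes on version B (the rewrite author's own statement) =====
-- stated objective: faster
-- what changed: Replaces the char-by-char ripple adder (string prepending per bit, plus a recursive re-add of the end-around carry) by integer arithmetic: convert both strings to numbers, add, fold the end-around carry with shift/mask, and format the result back to an n-char binary string.
import Mathlib
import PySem

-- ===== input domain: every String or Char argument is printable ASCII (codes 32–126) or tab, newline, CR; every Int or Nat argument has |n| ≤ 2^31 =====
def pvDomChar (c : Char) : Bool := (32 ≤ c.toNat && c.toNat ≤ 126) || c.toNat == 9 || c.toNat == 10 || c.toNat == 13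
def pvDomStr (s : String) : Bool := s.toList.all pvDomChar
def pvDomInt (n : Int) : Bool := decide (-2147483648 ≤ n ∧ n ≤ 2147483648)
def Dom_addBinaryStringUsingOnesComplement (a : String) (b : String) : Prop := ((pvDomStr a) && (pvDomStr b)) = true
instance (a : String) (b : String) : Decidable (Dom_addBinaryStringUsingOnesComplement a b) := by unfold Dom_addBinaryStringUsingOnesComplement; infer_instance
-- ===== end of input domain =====

-- B replaces A's char-by-char ripple adder (with recursive re-add of the end-around carry)
-- by integer arithmetic: string→number, add, fold the carry with shift/mask, format back.
-- Same return value on all inputs; neither version mutates its arguments.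

-- ===== PORT A =====

-- A's for-loop over i in range(max_len-1, -1, -1): the Nat argument k means "indices k-1 … 0
-- are still to be processed"; state (result, carry) exactly as in the Python.
-- Index k is always in range when called with k ≤ length (the getD default is never used).
def rippleA (aL bL : List Char) : Nat → List Char → Nat → List Char × Nat
  | 0, res, c => (res, c)
  | k+1, res, c =>
      let r := c + (if aL.getD k ' ' = '1' then 1 else 0) + (if bL.getD k ' ' = '1' then 1 else 0)
      rippleA aL bL k ((if r % 2 = 1 then '1' else '0') :: res) (if r < 2 then 0 else 1)

-- the loop of A after both zfills, started with result = "" and carry = 0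
def rippleTop (a b : String) : List Char × Nat :=
  let n : Nat := max a.toList.length b.toList.length
  rippleA (PySem.Chars.zfill a.toList (n : Int)) (PySem.Chars.zfill b.toList (n : Int)) n [] 0

-- A's self-recursion, made structural on a fuel argument (a pure totality guard: the Python
-- recursion depth is at most 1 — see pv_inner below — so fuel 2 is never exhausted and the
-- fuel-0 line, the same return statement without the recursive call, is unreachable with carry ≠ 0)
def addGo : Nat → String → String → String
  | 0, a, b =>
      String.ofList (PySem.Chars.zfill (rippleTop a b).1
        ((max a.toList.length b.toList.length : Nat) : Int))
  | fuel+1, a, b =>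
      if (rippleTop a b).2 ≠ 0 then
        String.ofList (PySem.Chars.zfill
          (addGo fuel (String.ofList (rippleTop a b).1) "1").toList
          ((max a.toList.length b.toList.length : Nat) : Int))
      else
        String.ofList (PySem.Chars.zfill (rippleTop a b).1
          ((max a.toList.length b.toList.length : Nat) : Int))

def addBinaryStringUsingOnesComplement (a : String) (b : String) : String :=
  addGo 2 a b

-- ===== PORT B =====

-- the value a digit string denotes when every non-'1' char counts as 0 (B's loop body; also
-- the quantity A's loop characterisation is stated in)
def pyVal (l : List Char) : Nat :=
  l.foldl (fun v c => v * 2 + (if c = '1' then 1 else 0)) 0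

-- while total >> n: total = (total >> n) + (total & ((1 << n) - 1)).
-- The extra '0 < n' conjunct only makes the recursion total; in B, n = 0 forces t = 0,
-- so it never changes the computed value.
-- (cited by endAround's decreasing_by)
theorem endAround_dec (n t : Nat) (h1 : t >>> n ≠ 0) (h2 : 0 < n) :
    t >>> n + (t &&& (1 <<< n - 1)) < t := by
  rw [Nat.shiftRight_eq_div_pow] at h1
  have hmask : t &&& (1 <<< n - 1) = t % 2 ^ n := by
    rw [Nat.shiftLeft_eq, one_mul, Nat.and_two_pow_sub_one_eq_mod]
  have hp2 : 2 ≤ 2 ^ n := by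
    calc 2 = 2 ^ 1 := rfl
    _ ≤ 2 ^ n := Nat.pow_le_pow_right (by omega) h2
  have hq : 1 ≤ t / 2 ^ n := Nat.pos_of_ne_zero h1
  have hmul : 2 * (t / 2 ^ n) ≤ 2 ^ n * (t / 2 ^ n) := Nat.mul_le_mul_right _ hp2
  have hsplit := Nat.mod_add_div t (2 ^ n)
  rw [Nat.shiftRight_eq_div_pow, hmask]
  omega

def endAround (n : Nat) (t : Nat) : Nat :=
  if h : t >>> n ≠ 0 ∧ 0 < n then endAround n ((t >>> n) + (t &&& (1 <<< n - 1))) else t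
termination_by t
decreasing_by exact endAround_dec n t h.1 h.2

-- hand port of format(t, 'b') for t ≥ 0 (exact there): minimal binary digit string, '[]' only at 0
def bRepr : Nat → List Char
  | 0 => []
  | m+1 => bRepr ((m+1) / 2) ++ [if (m+1) % 2 = 1 then '1' else '0']
decreasing_by omega

def addBinaryStringUsingOnesComplement_alt (a : String) (b : String) : String :=
  let n : Nat := max a.toList.length b.toList.length
  let va : Nat := pyVal a.toList
  let vb : Nat := pyVal b.toList
  let t : Nat := endAround n (va + vb)
  if t = 0 then String.ofList (List.replicate n '0')
  else String.ofList (List.replicate (n - (bRepr t).length) '0' ++ bRepr t)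

-- ===== PRECONDITION & SPEC =====
def Spec_addBinaryStringUsingOnesComplement (a : String) (b : String) (out : String) : Prop := out = addBinaryStringUsingOnesComplement_alt a b
instance (a : String) (b : String) (out : String) : Decidable (Spec_addBinaryStringUsingOnesComplement a b out) := by unfold Spec_addBinaryStringUsingOnesComplement; infer_instance

-- ===== CLAIM (what is proved, stated in full; the proofs are below) =====
def Claim_equal_addBinaryStringUsingOnesComplement : Prop := ∀ (a : String) (b : String), Dom_addBinaryStringUsingOnesComplement a b → Spec_addBinaryStringUsingOnesComplement a b (addBinaryStringUsingOnesComplement a b)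

-- ===== LEMMAS AND PROOFS =====

-- '0'/'1' rendering of the low k bits of m, most significant first (used only to STATE the
-- loop characterisation lemmas that A's termination proof cites; neither port is defined by it).
def binStr : Nat → Nat → List Char
  | 0, _ => []
  | k+1, m => binStr k (m / 2) ++ [if m % 2 = 1 then '1' else '0']

theorem pv_foldl_val_lt (l : List Char) : ∀ (v : Nat),
    List.foldl (fun v c => v * 2 + (if c = '1' then 1 else 0)) v l < (v + 1) * 2 ^ l.length := by
  induction l with
  | nil => intro v; simpa using Nat.lt_succ_self v
  | cons c l ih =>
      intro v
      have h1 := ih (v * 2 + (if c = '1' then 1 else 0))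
      have h2 : (v * 2 + (if c = '1' then 1 else 0)) + 1 ≤ (v + 1) * 2 := by
        split_ifs <;> omega
      calc List.foldl (fun v c => v * 2 + (if c = '1' then 1 else 0)) v (c :: l)
          = List.foldl (fun v c => v * 2 + (if c = '1' then 1 else 0))
              (v * 2 + (if c = '1' then 1 else 0)) l := rfl
        _ < ((v * 2 + (if c = '1' then 1 else 0)) + 1) * 2 ^ l.length := h1
        _ ≤ ((v + 1) * 2) * 2 ^ l.length := Nat.mul_le_mul_right _ h2
        _ = (v + 1) * 2 ^ (c :: l).length := by rw [List.length_cons, pow_succ]; ring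

theorem pyVal_lt (l : List Char) : pyVal l < 2 ^ l.length := by
  simpa [pyVal] using pv_foldl_val_lt l 0

theorem pv_foldl_rep0 (k : Nat) :
    List.foldl (fun v c => v * 2 + (if c = '1' then 1 else 0)) 0 (List.replicate k '0') = 0 := by
  induction k with
  | zero => rfl
  | succ k ih => simpa [List.replicate_succ] using ih

theorem pv_foldl_zero_replicate (k : Nat) (l : List Char) :
    List.foldl (fun v c => v * 2 + (if c = '1' then 1 else 0)) 0 (List.replicate k '0' ++ l)
      = List.foldl (fun v c => v * 2 + (if c = '1' then 1 else 0)) 0 l := by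
  rw [List.foldl_append, pv_foldl_rep0]

theorem pyVal_zfill (cs : List Char) (n : Nat) :
    pyVal (PySem.Chars.zfill cs (n : Int)) = pyVal cs := by
  rcases cs with _ | ⟨c, rest⟩
  · unfold PySem.Chars.zfill
    split
    · rfl
    · simpa [pyVal] using pv_foldl_zero_replicate (Int.toNat (n : Int)) []
  · unfold PySem.Chars.zfill
    split
    · rfl
    · dsimp only
      by_cases hc : c = '+' ∨ c = '-'
      · rw [if_pos hc]
        have hb : (if c = '1' then (1 : Nat) else 0) = 0 := by
          rcases hc with h | h <;> subst h <;> decide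
        simp [pyVal, List.foldl_cons, hb, pv_foldl_rep0]
      · rw [if_neg hc]
        simpa [pyVal] using
          pv_foldl_zero_replicate (((n : Int)).toNat - (c :: rest).length) (c :: rest)

theorem binStr_length (k m : Nat) : (binStr k m).length = k := by
  induction k generalizing m with
  | zero => rfl
  | succ k ih => simp [binStr, ih]

theorem pv_mod_pow_div (m k : Nat) : (m % 2 ^ (k + 1)) / 2 = (m / 2) % 2 ^ k := by
  rw [pow_succ, mul_comm, Nat.mod_mul_right_div_self]

theorem pyVal_binStr (k : Nat) : ∀ (m : Nat), pyVal (binStr k m) = m % 2 ^ k := by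
  induction k with
  | zero => intro m; simp [binStr, pyVal, Nat.mod_one]
  | succ k ih =>
      intro m
      have happ : pyVal (binStr k (m / 2) ++ [if m % 2 = 1 then '1' else '0'])
          = pyVal (binStr k (m / 2)) * 2
            + (if (if m % 2 = 1 then ('1' : Char) else '0') = '1' then 1 else 0) := by
        simp [pyVal, List.foldl_append]
      rw [binStr, happ, ih]
      have hbit : (if (if m % 2 = 1 then ('1' : Char) else '0') = '1' then (1 : Nat) else 0)
          = m % 2 := by
        rcases Nat.mod_two_eq_zero_or_one m with h | h <;> rw [h] <;> simp
      have hd := pv_mod_pow_div m k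
      have h2 : (m % 2 ^ (k + 1)) % 2 = m % 2 :=
        Nat.mod_mod_of_dvd m (dvd_pow_self 2 (Nat.succ_ne_zero k))
      omega

-- main characterisation of A's loop
theorem ripple_spec (aL bL : List Char) : ∀ (k : Nat) (res : List Char) (c : Nat),
    c ≤ 1 → k ≤ aL.length → k ≤ bL.length →
    rippleA aL bL k res c =
      (binStr k ((pyVal (aL.take k) + pyVal (bL.take k) + c) % 2 ^ k) ++ res,
       if 2 ^ k ≤ pyVal (aL.take k) + pyVal (bL.take k) + c then 1 else 0) := by
  intro k
  induction k with
  | zero =>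
      intro res c hc _ _
      simp only [rippleA, List.take_zero, binStr, List.nil_append, pyVal, List.foldl_nil,
        pow_zero, Prod.mk.injEq]
      exact ⟨by trivial, by split_ifs <;> omega⟩
  | succ k ih =>
      intro res c hc ha hb
      have ha' : k < aL.length := by omega
      have hb' : k < bL.length := by omega
      have hgA : aL.getD k ' ' = aL[k] := List.getD_eq_getElem aL ' ' ha'
      have hgB : bL.getD k ' ' = bL[k] := List.getD_eq_getElem bL ' ' hb'
      have htA : aL.take (k+1) = aL.take k ++ [aL[k]] := by
        rw [List.take_add_one, List.getElem?_eq_getElem ha', Option.toList_some]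
      have htB : bL.take (k+1) = bL.take k ++ [bL[k]] := by
        rw [List.take_add_one, List.getElem?_eq_getElem hb', Option.toList_some]
      have hvApp : ∀ (l : List Char) (ch : Char),
          pyVal (l ++ [ch]) = pyVal l * 2 + (if ch = '1' then 1 else 0) := by
        intro l ch; simp [pyVal, List.foldl_append]
      set bitA : Nat := if aL[k] = '1' then 1 else 0 with hbitA
      set bitB : Nat := if bL[k] = '1' then 1 else 0 with hbitB
      have hbA1 : bitA ≤ 1 := by rw [hbitA]; split_ifs <;> omega
      have hbB1 : bitB ≤ 1 := by rw [hbitB]; split_ifs <;> omega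
      set A' : Nat := pyVal (aL.take k) with hA'
      set B' : Nat := pyVal (bL.take k) with hB'
      set r : Nat := c + bitA + bitB with hr
      have hr3 : r ≤ 3 := by omega
      set S : Nat := pyVal (aL.take (k+1)) + pyVal (bL.take (k+1)) + c with hS
      have hSval : S = 2 * (A' + B') + r := by
        rw [hS, htA, htB, hvApp, hvApp, ← hA', ← hB', ← hbitA, ← hbitB]; omega
      have hcr : (if r < 2 then (0 : Nat) else 1) = r / 2 := by split_ifs <;> omega
      have step : rippleA aL bL (k+1) res c =
          rippleA aL bL k ((if r % 2 = 1 then '1' else '0') :: res) (if r < 2 then 0 else 1) := by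
        simp only [rippleA, hgA, hgB, ← hbitA, ← hbitB, ← hr]
      rw [step, ih _ _ (by split_ifs <;> omega) (by omega) (by omega)]
      rw [Prod.mk.injEq]
      have hc' : A' + B' + (if r < 2 then (0 : Nat) else 1) = S / 2 := by
        rw [hcr, hSval]; omega
      refine ⟨?_, ?_⟩
      · show binStr k ((A' + B' + (if r < 2 then 0 else 1)) % 2 ^ k) ++ ((if r % 2 = 1 then '1' else '0') :: res)
            = binStr (k+1) (S % 2 ^ (k+1)) ++ res
        rw [hc']
        have hdig : (if (S % 2 ^ (k+1)) % 2 = 1 then ('1' : Char) else '0')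
            = (if r % 2 = 1 then '1' else '0') := by
          have h2 : (S % 2 ^ (k+1)) % 2 = S % 2 :=
            Nat.mod_mod_of_dvd S (dvd_pow_self 2 (Nat.succ_ne_zero k))
          have h3 : S % 2 = r % 2 := by omega
          rw [h2, h3]
        show binStr k (S / 2 % 2 ^ k) ++ ((if r % 2 = 1 then '1' else '0') :: res)
            = (binStr k (S % 2 ^ (k+1) / 2) ++ [if (S % 2 ^ (k+1)) % 2 = 1 then '1' else '0']) ++ res
        rw [pv_mod_pow_div, hdig, List.append_assoc, List.singleton_append]
      · show (if 2 ^ k ≤ A' + B' + (if r < 2 then 0 else 1) then (1 : Nat) else 0)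
            = if 2 ^ (k+1) ≤ S then (1 : Nat) else 0
        rw [hc']
        have hpow : 2 ^ (k+1) = 2 ^ k * 2 := pow_succ 2 k
        have hiff : 2 ^ k ≤ S / 2 ↔ 2 ^ (k+1) ≤ S := by
          rw [hpow, Nat.le_div_iff_mul_le (by omega)]
        split_ifs with h1 h2
        · rfl
        · exact absurd (hiff.mp h1) h2
        · exact absurd (hiff.mpr ‹_›) h1
        · rfl

theorem rippleTop_spec (a b : String) :
    rippleTop a b =
      (binStr (max a.toList.length b.toList.length)
         ((pyVal a.toList + pyVal b.toList) % 2 ^ (max a.toList.length b.toList.length)),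
       if 2 ^ (max a.toList.length b.toList.length) ≤ pyVal a.toList + pyVal b.toList
         then 1 else 0) := by
  set n : Nat := max a.toList.length b.toList.length with hn
  have hlA : (PySem.Chars.zfill a.toList (n : Int)).length = n := by
    rw [PySem.Chars.length_zfill]; simp [hn]; omega
  have hlB : (PySem.Chars.zfill b.toList (n : Int)).length = n := by
    rw [PySem.Chars.length_zfill]; simp [hn]; omega
  have h := ripple_spec (PySem.Chars.zfill a.toList (n : Int)) (PySem.Chars.zfill b.toList (n : Int))
      n [] 0 (by omega) (le_of_eq hlA.symm) (le_of_eq hlB.symm)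
  unfold rippleTop
  rw [← hn, h, List.take_of_length_le (le_of_eq hlA), List.take_of_length_le (le_of_eq hlB),
    pyVal_zfill, pyVal_zfill]
  simp

-- the two added values are each < 2^n, so their sum is at most 2^(n+1) - 2
theorem pv_T_lt (a b : String) :
    pyVal a.toList + pyVal b.toList
      ≤ 2 ^ (max a.toList.length b.toList.length) + 2 ^ (max a.toList.length b.toList.length) - 2 := by
  have h1 := pyVal_lt a.toList
  have h2 := pyVal_lt b.toList
  have h3 : 2 ^ a.toList.length ≤ 2 ^ (max a.toList.length b.toList.length) :=
    Nat.pow_le_pow_right (by omega) (le_max_left _ _)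
  have h4 : 2 ^ b.toList.length ≤ 2 ^ (max a.toList.length b.toList.length) :=
    Nat.pow_le_pow_right (by omega) (le_max_right _ _)
  omega

-- after a carrying add, re-adding "1" cannot carry again; computes the inner call's loop output
theorem pv_inner (a b : String) (h : (rippleTop a b).2 ≠ 0) :
    (rippleTop a b).2 = 1 ∧
    rippleTop (String.ofList (rippleTop a b).1) "1"
      = (binStr (max a.toList.length b.toList.length)
           ((pyVal a.toList + pyVal b.toList) % 2 ^ (max a.toList.length b.toList.length) + 1), 0) := by
  set n : Nat := max a.toList.length b.toList.length with hn
  set T : Nat := pyVal a.toList + pyVal b.toList with hT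
  have hs := rippleTop_spec a b
  rw [← hn, ← hT] at hs
  have hcar : 2 ^ n ≤ T := by
    by_contra hcon
    rw [hs] at h; simp [if_neg hcon] at h
  have hub := pv_T_lt a b
  rw [← hn, ← hT] at hub
  have hn1 : 1 ≤ n := by
    by_contra hcon
    have hn0 : n = 0 := by omega
    rw [hn0] at hcar hub; omega
  have hp2 : 2 ≤ 2 ^ n := by
    calc 2 = 2 ^ 1 := rfl
    _ ≤ 2 ^ n := Nat.pow_le_pow_right (by omega) hn1
  have hres : (rippleTop a b).1 = binStr n (T % 2 ^ n) := by rw [hs]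
  refine ⟨by rw [hs]; simp [if_pos hcar], ?_⟩
  have hmkl : (String.ofList (rippleTop a b).1).toList = (rippleTop a b).1 := String.toList_ofList
  have hone : ("1" : String).toList = ['1'] := by simp
  have hs2 := rippleTop_spec (String.ofList (rippleTop a b).1) "1"
  rw [hmkl, hone] at hs2
  have hmax : max (rippleTop a b).1.length (['1'] : List Char).length = n := by
    have h1 : (rippleTop a b).1.length = n := by rw [hres, binStr_length]
    have h2 : (['1'] : List Char).length = 1 := rfl
    rw [h1, h2]; omega
  rw [hmax] at hs2
  have hv1 : pyVal ['1'] = 1 := by simp [pyVal]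
  have hvres : pyVal (rippleTop a b).1 = T % 2 ^ n := by
    rw [hres, pyVal_binStr]
    exact Nat.mod_mod_of_dvd T dvd_rfl
  rw [hvres, hv1] at hs2
  have hTmod : T % 2 ^ n = T - 2 ^ n := by
    have hdiv : T / 2 ^ n = 1 := Nat.div_eq_of_lt_le (by simpa using hcar) (by omega)
    have hmd := Nat.mod_add_div T (2 ^ n)
    rw [hdiv, mul_one] at hmd
    omega
  have hlt : T % 2 ^ n + 1 < 2 ^ n := by omega
  rw [hs2, Nat.mod_eq_of_lt hlt, if_neg (by omega)]

theorem pv_zfill_self (cs : List Char) (n : Nat) (h : cs.length = n) :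
    PySem.Chars.zfill cs (n : Int) = cs := by
  unfold PySem.Chars.zfill
  rw [if_pos (by exact_mod_cast Nat.le_of_eq h.symm)]

theorem binStr_zero (n : Nat) : binStr n 0 = List.replicate n '0' := by
  induction n with
  | zero => rfl
  | succ n ih => simp [binStr, ih, List.replicate_succ']

theorem bRepr_pos (v : Nat) (hv : 0 < v) :
    bRepr v = bRepr (v / 2) ++ [if v % 2 = 1 then '1' else '0'] := by
  cases v with
  | zero => omega
  | succ m => rw [bRepr]

theorem binStr_eq_pad (n : Nat) : ∀ (v : Nat), v < 2 ^ n →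
    binStr n v = List.replicate (n - (bRepr v).length) '0' ++ bRepr v := by
  induction n with
  | zero =>
      intro v hv
      have : v = 0 := by simpa using hv
      subst this; simp [binStr, bRepr]
  | succ n ih =>
      intro v hv
      by_cases h0 : v = 0
      · subst h0
        simp [binStr_zero, bRepr]
      · have hdiv : v / 2 < 2 ^ n := by
          rw [Nat.div_lt_iff_lt_mul (by omega)]
          calc v < 2 ^ (n+1) := hv
          _ = 2 ^ n * 2 := pow_succ 2 n
        have hb := bRepr_pos v (by omega)
        have hlen : (bRepr v).length = (bRepr (v / 2)).length + 1 := by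
          rw [hb]; simp
        rw [binStr, ih (v / 2) hdiv, hb]
        have hL : (bRepr (v / 2) ++ [if v % 2 = 1 then '1' else '0']).length
            = (bRepr (v / 2)).length + 1 := by simp
        rw [hL]
        have he : n + 1 - ((bRepr (v / 2)).length + 1) = n - (bRepr (v / 2)).length := by omega
        rw [he, ← List.append_assoc]

theorem endAround_eq (n va vb : Nat) (hva : va < 2 ^ n) (hvb : vb < 2 ^ n) :
    endAround n (va + vb) = if 2 ^ n ≤ va + vb then (va + vb) % 2 ^ n + 1 else va + vb := by
  set T : Nat := va + vb with hT
  by_cases hc : 2 ^ n ≤ T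
  · have hn1 : 1 ≤ n := by
      by_contra hcon
      have : n = 0 := by omega
      subst this; simp at hva hvb; omega
    have hp2 : 2 ≤ 2 ^ n := by
      calc 2 = 2 ^ 1 := rfl
      _ ≤ 2 ^ n := Nat.pow_le_pow_right (by omega) hn1
    have hub : T ≤ 2 ^ n + 2 ^ n - 2 := by omega
    have hdiv : T / 2 ^ n = 1 := Nat.div_eq_of_lt_le (by simpa using hc) (by omega)
    have hTmod : T % 2 ^ n = T - 2 ^ n := by
      have hmd := Nat.mod_add_div T (2 ^ n)
      rw [hdiv, mul_one] at hmd
      omega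
    have hmask : T &&& (1 <<< n - 1) = T % 2 ^ n := by
      rw [Nat.shiftLeft_eq, one_mul, Nat.and_two_pow_sub_one_eq_mod]
    rw [endAround, dif_pos ⟨by rw [Nat.shiftRight_eq_div_pow, hdiv]; omega, by omega⟩]
    rw [Nat.shiftRight_eq_div_pow, hdiv, hmask]
    have hlt : 1 + T % 2 ^ n < 2 ^ n := by omega
    rw [endAround, dif_neg]
    · rw [if_pos hc]; omega
    · rw [Nat.shiftRight_eq_div_pow]
      intro hcon
      exact hcon.1 (Nat.div_eq_of_lt hlt)
  · rw [endAround, dif_neg, if_neg hc]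
    rw [Nat.shiftRight_eq_div_pow]
    intro hcon
    exact hcon.1 (Nat.div_eq_of_lt (by omega))

-- B's output equals the n-char binary rendering of v, for any v < 2^n
theorem pv_format_eq (n v : Nat) (hv : v < 2 ^ n) :
    (if v = 0 then String.ofList (List.replicate n '0')
     else String.ofList (List.replicate (n - (bRepr v).length) '0' ++ bRepr v))
      = String.ofList (binStr n v) := by
  by_cases h0 : v = 0
  · subst h0; rw [if_pos rfl, binStr_zero]
  · rw [if_neg h0, binStr_eq_pad n v hv]

theorem addGo_succ (fuel : Nat) (a b : String) :
    addGo (fuel+1) a b =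
      if (rippleTop a b).2 ≠ 0 then
        String.ofList (PySem.Chars.zfill
          (addGo fuel (String.ofList (rippleTop a b).1) "1").toList
          ((max a.toList.length b.toList.length : Nat) : Int))
      else
        String.ofList (PySem.Chars.zfill (rippleTop a b).1
          ((max a.toList.length b.toList.length : Nat) : Int)) := rfl

-- ===== VERDICT (by name: the statement is the Claim_ definition above) =====
theorem addBinaryStringUsingOnesComplement_spec : Claim_equal_addBinaryStringUsingOnesComplement := by
  intro a b _
  unfold Spec_addBinaryStringUsingOnesComplement
  set n : Nat := max a.toList.length b.toList.length with hn
  set va : Nat := pyVal a.toList with hva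
  set vb : Nat := pyVal b.toList with hvb
  have hvaLt : va < 2 ^ n :=
    lt_of_lt_of_le (pyVal_lt a.toList) (Nat.pow_le_pow_right (by omega) (le_max_left _ _))
  have hvbLt : vb < 2 ^ n :=
    lt_of_lt_of_le (pyVal_lt b.toList) (Nat.pow_le_pow_right (by omega) (le_max_right _ _))
  have hs := rippleTop_spec a b
  rw [← hn, ← hva, ← hvb] at hs
  have hBalt : addBinaryStringUsingOnesComplement_alt a b
      = String.ofList (binStr n (if 2 ^ n ≤ va + vb then (va + vb) % 2 ^ n + 1 else va + vb)) := by
    show (if endAround n (va + vb) = 0 then String.ofList (List.replicate n '0')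
          else String.ofList
            (List.replicate (n - (bRepr (endAround n (va + vb))).length) '0'
              ++ bRepr (endAround n (va + vb))))
        = String.ofList (binStr n (if 2 ^ n ≤ va + vb then (va + vb) % 2 ^ n + 1 else va + vb))
    rw [endAround_eq n va vb hvaLt hvbLt]
    apply pv_format_eq
    split_ifs with h
    · have hTmod : (va + vb) % 2 ^ n = va + vb - 2 ^ n := by
        have hdiv : (va + vb) / 2 ^ n = 1 := Nat.div_eq_of_lt_le (by simpa using h) (by omega)
        have hmd := Nat.mod_add_div (va + vb) (2 ^ n)
        rw [hdiv, mul_one] at hmd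
        omega
      omega
    · omega
  rw [hBalt]
  show addGo 2 a b = _
  by_cases hc : 2 ^ n ≤ va + vb
  · have hcar : (rippleTop a b).2 ≠ 0 := by rw [hs]; simp [if_pos hc]
    have hin := pv_inner a b hcar
    rw [← hn, ← hva, ← hvb] at hin
    rw [addGo_succ, if_pos hcar, ← hn]
    have hinner : addGo 1 (String.ofList (rippleTop a b).1) "1"
        = String.ofList (binStr n ((va + vb) % 2 ^ n + 1)) := by
      have hcar2 : ¬ (rippleTop (String.ofList (rippleTop a b).1) "1").2 ≠ 0 := by
        rw [hin.2]
        simp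
      rw [addGo_succ, if_neg hcar2]
      have hmaxin : max (String.ofList (rippleTop a b).1).toList.length ("1" : String).toList.length
          = n := by
        have h1 : (String.ofList (rippleTop a b).1).toList = (rippleTop a b).1 := String.toList_ofList
        have h2 : (rippleTop a b).1.length = n := by rw [hs]; exact binStr_length _ _
        have h3 : ("1" : String).toList.length = 1 := rfl
        rw [h1, h2, h3]
        have hn1 : 1 ≤ n := by
          by_contra hcon
          have hzero : n = 0 := by omega
          rw [hzero] at hc hvaLt hvbLt
          simp at hc hvaLt hvbLt
          omega
        omega
      rw [hmaxin]
      apply congrArg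
      have hres1 : (rippleTop (String.ofList (rippleTop a b).1) "1").1
          = binStr n ((va + vb) % 2 ^ n + 1) := by rw [hin.2]
      rw [hres1]
      exact pv_zfill_self _ _ (binStr_length _ _)
    rw [hinner]
    apply congrArg
    rw [if_pos hc, String.toList_ofList]
    exact pv_zfill_self _ _ (binStr_length _ _)
  · have hcar : ¬ (rippleTop a b).2 ≠ 0 := by rw [hs]; simp [if_neg hc]
    rw [addGo_succ, if_neg hcar, ← hn]
    apply congrArg
    have hres1 : (rippleTop a b).1 = binStr n ((va + vb) % 2 ^ n) := by rw [hs]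
    rw [hres1, if_neg hc, Nat.mod_eq_of_lt (by omega)]
    exact pv_zfill_self _ _ (binStr_length _ _)
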